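-- pv_equiv track=rewrite | github.com/bkrmalick/uni | Misc. Python/recursive sum consecutive pairs.py | sumCons
-- ===== SOURCE A (Python) =====
-- A=[1,2,3,4,5]
--
-- def sumCons(i,j):
--     if(i==j):
--
--         return A[i]
--     elif(j-i==1):
--         return A[i]*A[j]
--     else:
--         k=int((i+j)/2)
--         return(sumCons(i,k-1)+(sumCons(k,j)))
-- ===== SOURCE B (Python) =====
-- A=[1,2,3,4,5]
--
-- def sumCons(i,j):
--     # Explicit-stack iterative traversal; addition is commutative/associative,
--     # so visiting order does not matter.
--     total = 0
--     stack = [(i, j)]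
--     while stack:
--         a, b = stack.pop()
--         if a == b:
--             total += A[a]
--         elif b - a == 1:
--             total += A[a] * A[b]
--         else:
--             k = int((a + b) / 2)
--             stack.append((a, k - 1))
--             stack.append((k, b))
--     return total
-- ===== Notes on version B (the rewrite author's own statement) =====
-- stated objective: alternative
-- what changed: Replaces the midpoint-split recursion by an explicit-stack iterative loop with a single integer accumulator; since the combining operation is integer addition, the traversal order is irrelevant and the result is identical.
import Mathlib
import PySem

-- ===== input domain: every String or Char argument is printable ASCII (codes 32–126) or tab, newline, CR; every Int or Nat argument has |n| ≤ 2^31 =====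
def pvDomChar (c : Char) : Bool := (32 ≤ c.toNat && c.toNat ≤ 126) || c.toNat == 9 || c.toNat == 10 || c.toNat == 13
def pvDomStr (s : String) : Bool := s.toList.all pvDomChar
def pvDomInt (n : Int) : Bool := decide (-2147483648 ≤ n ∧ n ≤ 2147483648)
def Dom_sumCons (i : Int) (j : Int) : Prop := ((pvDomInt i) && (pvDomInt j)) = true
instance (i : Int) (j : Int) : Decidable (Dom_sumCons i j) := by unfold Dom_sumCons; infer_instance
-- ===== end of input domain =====

-- B replaces the midpoint-split recursion by an explicit-stack loop with a single
-- integer accumulator (alternative decomposition; same asymptotic cost).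

-- ===== PORT A =====
-- the module-level constant A
def arrA : List Int := [1, 2, 3, 4, 5]

-- A's recursion, made structural with a fuel counter (a totality guard only: enough fuel
-- is supplied below, and the 'else 0'/fuel-0 branches are only reachable when i > j, where
-- the Python recurses without bound — excluded by Pre_).  int((i+j)/2) is
-- PySem.Int.truncdiv; A[i] is pyGetD … 0: the default is only taken where Python raises
-- IndexError, which Pre_ excludes.
def sumConsGo (fuel : Nat) (i : Int) (j : Int) : Int :=
  match fuel with
  | 0 => 0
  | fuel + 1 =>
    if i = j then PySem.List.pyGetD arrA i 0
    else if j - i = 1 then PySem.List.pyGetD arrA i 0 * PySem.List.pyGetD arrA j 0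
    else if i < j then
      let k := PySem.Int.truncdiv (i + j) 2
      sumConsGo fuel i (k - 1) + sumConsGo fuel k j
    else 0

def sumCons (i : Int) (j : Int) : Int := sumConsGo ((j - i).toNat + 1) i j

-- ===== PORT B =====
-- the while loop of Source B: stack of pending (a, b) ranges with the list head as the top of
-- the stack (Python's append/pop end) and an integer accumulator; fuel is a totality
-- guard only (the supplied fuel covers every iteration whenever i ≤ j, and the a > b
-- 'else' skip is never reached under Pre_).
def sumConsLoopGo (fuel : Nat) (stack : List (Int × Int)) (total : Int) : Int :=
  match fuel, stack with
  | _, [] => total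
  | 0, _ => total
  | fuel + 1, (a, b) :: rest =>
    if a = b then sumConsLoopGo fuel rest (total + PySem.List.pyGetD arrA a 0)
    else if b - a = 1 then
      sumConsLoopGo fuel rest (total + PySem.List.pyGetD arrA a 0 * PySem.List.pyGetD arrA b 0)
    else if a < b then
      let k := PySem.Int.truncdiv (a + b) 2
      sumConsLoopGo fuel ((k, b) :: (a, k - 1) :: rest) total
    else sumConsLoopGo fuel rest total

def sumCons_alt (i : Int) (j : Int) : Int :=
  sumConsLoopGo (2 * (j - i).toNat + 2) [(i, j)] 0

-- ===== PRECONDITION & SPEC =====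
-- Pre_ excludes exactly the inputs on which the Python A does not return: any base case
-- with an index outside [-5, 4] raises IndexError, and i > j recurses without bound
-- (RecursionError); A returns normally on all of -5 ≤ i ≤ j ≤ 4.
def Pre_sumCons (i : Int) (j : Int) : Prop := -5 ≤ i ∧ i ≤ j ∧ j ≤ 4
instance (i : Int) (j : Int) : Decidable (Pre_sumCons i j) := by unfold Pre_sumCons; infer_instance

def pvWitness_sumCons : Int × Int := (-2, 3)

def Spec_sumCons (i : Int) (j : Int) (out : Int) : Prop := out = sumCons_alt i j
instance (i : Int) (j : Int) (out : Int) : Decidable (Spec_sumCons i j out) := by unfold Spec_sumCons; infer_instance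

-- ===== CLAIM (what is proved, stated in full; the proofs are below) =====
def Claim_equal_sumCons : Prop := ∀ (i : Int) (j : Int), Dom_sumCons i j → Pre_sumCons i j → Spec_sumCons i j (sumCons i j)

-- ===== LEMMAS AND PROOFS =====

-- bounds on Python's int((i+j)/2) (truncating division)
theorem truncdiv_mid_bounds (i j : Int) (h : i + 2 ≤ j) :
    i + 1 ≤ PySem.Int.truncdiv (i + j) 2 ∧ PySem.Int.truncdiv (i + j) 2 ≤ j - 1 := by
  simp only [PySem.Int.truncdiv]
  have h1 := Int.mul_tdiv_add_tmod (i + j) 2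
  have h2 : (i + j).tmod 2 = (i + j) % 2 ∨ (i + j).tmod 2 = -((-(i + j)) % 2) := by
    by_cases hn : 0 ≤ i + j
    · left; rw [Int.tmod_eq_emod_of_nonneg hn]
    · right
      have h3 : (i + j).tmod 2 = -((-(i + j)).tmod 2) := by
        rw [← Int.neg_tmod]; simp
      rw [h3, Int.tmod_eq_emod_of_nonneg (by omega)]
  omega

-- the result of A's recursion does not depend on the fuel once the fuel exceeds the width
theorem sumConsGo_irrel (fuel fuel' : Nat) (i j : Int)
    (h : (j - i).toNat < fuel) (h' : (j - i).toNat < fuel') :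
    sumConsGo fuel i j = sumConsGo fuel' i j := by
  induction fuel generalizing fuel' i j with
  | zero => omega
  | succ fuel ih =>
    match fuel', h' with
    | fuel' + 1, _ =>
      simp only [sumConsGo]
      by_cases h1 : i = j
      · simp [h1]
      · by_cases h2 : j - i = 1
        · simp [h1, h2]
        · by_cases h3 : i < j
          · have hk := truncdiv_mid_bounds i j (by omega)
            simp only [h1, h2, h3, if_false, if_true]
            rw [ih fuel' i _ (by omega) (by omega), ih fuel' _ j (by omega) (by omega)]
          · simp [h1, h2, h3]

-- one-step unfolding of A's recursion (definitional)
theorem sumConsGo_succ (fuel : Nat) (i j : Int) :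
    sumConsGo (fuel + 1) i j =
      (if i = j then PySem.List.pyGetD arrA i 0
       else if j - i = 1 then PySem.List.pyGetD arrA i 0 * PySem.List.pyGetD arrA j 0
       else if i < j then
         sumConsGo fuel i (PySem.Int.truncdiv (i + j) 2 - 1)
           + sumConsGo fuel (PySem.Int.truncdiv (i + j) 2) j
       else 0) := rfl

-- the four one-step unfoldings of A's port
theorem sumCons_eq_self (a : Int) : sumCons a a = PySem.List.pyGetD arrA a 0 := by
  simp [sumCons, sumConsGo]

theorem sumCons_pair (a b : Int) (h1 : ¬ a = b) (h2 : b - a = 1) :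
    sumCons a b = PySem.List.pyGetD arrA a 0 * PySem.List.pyGetD arrA b 0 := by
  simp [sumCons, sumConsGo, h1, h2]

theorem sumCons_split (a b : Int) (h1 : ¬ a = b) (h2 : ¬ b - a = 1) (h3 : a < b) :
    sumCons a b = sumCons a (PySem.Int.truncdiv (a + b) 2 - 1)
      + sumCons (PySem.Int.truncdiv (a + b) 2) b := by
  have hk := truncdiv_mid_bounds a b (by omega)
  unfold sumCons
  rw [sumConsGo_succ ((b - a).toNat) a b, if_neg h1, if_neg h2, if_pos h3]
  rw [sumConsGo_irrel ((b - a).toNat) ((PySem.Int.truncdiv (a + b) 2 - 1 - a).toNat + 1)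
        a (PySem.Int.truncdiv (a + b) 2 - 1) (by omega) (by omega),
      sumConsGo_irrel ((b - a).toNat) ((b - PySem.Int.truncdiv (a + b) 2).toNat + 1)
        (PySem.Int.truncdiv (a + b) 2) b (by omega) (by omega)]

theorem sumCons_junk (a b : Int) (h1 : ¬ a = b) (h2 : ¬ b - a = 1) (h3 : ¬ a < b) :
    sumCons a b = 0 := by
  simp [sumCons, sumConsGo, h1, h2, h3]

-- the measure of a stack: total fuel the loop can still need
def stackMeasure : List (Int × Int) → Nat
  | [] => 0
  | (a, b) :: rest => 2 * (b - a).toNat + 1 + stackMeasure rest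

-- loop invariant: with enough fuel the loop returns the accumulator plus the A-value of
-- every pending range on the stack (order of combination is irrelevant because + commutes)
theorem sumConsLoopGo_eq (fuel : Nat) (stack : List (Int × Int)) (total : Int)
    (hf : stackMeasure stack < fuel) :
    sumConsLoopGo fuel stack total = total + (stack.map (fun p => sumCons p.1 p.2)).sum := by
  induction fuel generalizing stack total with
  | zero => omega
  | succ fuel ih =>
    match stack with
    | [] => simp [sumConsLoopGo]
    | (a, b) :: rest =>
      simp only [stackMeasure] at hf
      simp only [sumConsLoopGo]
      by_cases h1 : a = b
      · subst h1
        rw [if_pos rfl, ih rest _ (by omega), List.map_cons, List.sum_cons, sumCons_eq_self]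
        ring
      · by_cases h2 : b - a = 1
        · simp only [h1, h2, if_false, if_true]
          rw [ih rest _ (by omega), List.map_cons, List.sum_cons, sumCons_pair a b h1 h2]
          ring
        · by_cases h3 : a < b
          · have hk := truncdiv_mid_bounds a b (by omega)
            simp only [h1, h2, h3, if_false, if_true]
            rw [ih _ _ (by simp only [stackMeasure]; omega)]
            simp only [List.map_cons, List.sum_cons]
            rw [sumCons_split a b h1 h2 h3]
            ring
          · simp only [h1, h2, h3, if_false]
            rw [ih rest _ (by omega), List.map_cons, List.sum_cons, sumCons_junk a b h1 h2 h3]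
            ring

-- ===== VERDICT (by name: the statement is the Claim_ definition above) =====
theorem sumCons_spec : Claim_equal_sumCons := by
  intro i j _ _
  unfold Spec_sumCons sumCons_alt
  rw [sumConsLoopGo_eq _ _ _ (by simp [stackMeasure])]
  simp
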